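-- pv_equiv track=rewrite | github.com/DamonFinch/Genome-comparison | common_functions.py | z_to_label
-- ===== SOURCE A (Python) =====
-- def z_to_label(z, k):
--     label = ''
--     for i in range(k):
--         if i in z:
--             label += '1'
--         else:
--             label += '*'
--     return label
-- ===== SOURCE B (Python) =====
-- def z_to_label(z, k):
--     label = ['*'] * k
--     for i in z:
--         if 0 <= i < k:
--             label[i] = '1'
--     return ''.join(label)
-- ===== Notes on version B (the rewrite author's own statement) =====
-- stated objective: alternative
-- what changed: B allocates a '*' buffer of length k and patches the in-range positions listed in z, instead of scanning every position in range(k) and testing membership in z; the traversal is inverted (over z, not over range(k)).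
import Mathlib
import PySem

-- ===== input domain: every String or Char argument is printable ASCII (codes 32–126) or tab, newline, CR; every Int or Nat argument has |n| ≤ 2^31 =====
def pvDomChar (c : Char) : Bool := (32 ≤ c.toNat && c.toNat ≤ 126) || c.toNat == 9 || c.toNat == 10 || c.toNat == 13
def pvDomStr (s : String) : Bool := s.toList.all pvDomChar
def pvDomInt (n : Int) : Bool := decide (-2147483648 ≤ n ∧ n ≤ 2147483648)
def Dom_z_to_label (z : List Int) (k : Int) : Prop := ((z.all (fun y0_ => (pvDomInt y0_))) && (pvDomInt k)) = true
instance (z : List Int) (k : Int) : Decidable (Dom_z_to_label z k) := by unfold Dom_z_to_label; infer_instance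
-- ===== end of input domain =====

-- B patches a '*'-buffer at the in-range indices of z instead of scanning range(k) with a membership test (inverted traversal).


-- ===== PORT A =====
def z_to_label (z : List Int) (k : Int) : String :=
  (PySem.List.pyRange 0 k 1).foldl
    (fun label i => label ++ (if z.contains i then "1" else "*")) ""

-- ===== PORT B =====
def z_to_label_alt (z : List Int) (k : Int) : String :=
  String.ofList
    (z.foldl (fun buf i => if 0 ≤ i ∧ i < k then buf.set i.toNat '1' else buf)
      (List.replicate k.toNat '*'))

-- ===== PRECONDITION & SPEC =====
def Spec_z_to_label (z : List Int) (k : Int) (out : String) : Prop := out = z_to_label_alt z k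
instance (z : List Int) (k : Int) (out : String) : Decidable (Spec_z_to_label z k out) := by unfold Spec_z_to_label; infer_instance

-- ===== CLAIM (what is proved, stated in full; the proofs are below) =====
def Claim_equal_z_to_label : Prop := ∀ (z : List Int) (k : Int), Dom_z_to_label z k → Spec_z_to_label z k (z_to_label z k)

-- ===== LEMMAS AND PROOFS =====

-- A's loop builds exactly the character list (range k).map (membership test).
theorem zA_chars (z : List Int) (L : List Int) (s : String) :
    (L.foldl (fun label i => label ++ (if z.contains i then "1" else "*")) s).toList
      = s.toList ++ L.map (fun i => if (i : Int) ∈ z then '1' else '*') := by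
  induction L generalizing s with
  | nil => simp
  | cons i rest ih =>
    simp only [List.foldl_cons, ih, List.map_cons]
    by_cases h : i ∈ z <;> simp [h]

-- B's fold keeps the buffer length.
theorem zB_len (z : List Int) (k : Int) (buf : List Char) :
    (z.foldl (fun buf i => if 0 ≤ i ∧ i < k then buf.set i.toNat '1' else buf) buf).length
      = buf.length := by
  induction z generalizing buf with
  | nil => rfl
  | cons i rest ih =>
    simp only [List.foldl_cons]
    by_cases h : 0 ≤ i ∧ i < k <;> simp [h, ih]

-- B's fold: position j ends as '1' iff some in-range member of z hits it.
theorem zB_get (z : List Int) (k : Int) (buf : List Char) (j : Nat) (hj : j < buf.length) :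
    (z.foldl (fun buf i => if 0 ≤ i ∧ i < k then buf.set i.toNat '1' else buf) buf)[j]'
        (by rw [zB_len]; exact hj)
      = if ((j : Int) < k ∧ (j : Int) ∈ z) then '1' else buf[j]'hj := by
  induction z generalizing buf with
  | nil => simp
  | cons i rest ih =>
    simp only [List.foldl_cons]
    by_cases hg : 0 ≤ i ∧ i < k
    · simp only [if_pos hg]
      rw [ih (buf.set i.toNat '1') (by simpa using hj)]
      by_cases hji : (j : Int) = i
      · have hnat : i.toNat = j := by omega
        have h1 : (buf.set i.toNat '1')[j]'(by simpa using hj) = '1' := by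
          subst hnat; simp
        have hm : (j : Int) ∈ i :: rest := by simp [hji]
        have hc : (j : Int) < k ∧ (j : Int) ∈ i :: rest := ⟨by omega, hm⟩
        rw [if_pos hc]
        by_cases hr : (j : Int) < k ∧ (j : Int) ∈ rest
        · rw [if_pos hr]
        · rw [if_neg hr, h1]
      · have hnat : i.toNat ≠ j := by omega
        have h2 : (buf.set i.toNat '1')[j]'(by simpa using hj) = buf[j]'hj := by
          simp [hnat]
        rw [h2]
        have hcont : ((j : Int) ∈ i :: rest) ↔ ((j : Int) ∈ rest) := by
          simp [hji]
        simp only [hcont]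
    · simp only [if_neg hg]
      rw [ih buf hj]
      by_cases hji : (j : Int) = i
      · have h2 : ¬ ((j : Int) < k ∧ (j : Int) ∈ rest) := by
          intro h; exact hg ⟨by omega, by omega⟩
        have h1 : ¬ ((j : Int) < k ∧ (j : Int) ∈ i :: rest) := by
          rintro ⟨hk, hm⟩
          rcases List.mem_cons.mp hm with h | h
          · exact hg ⟨by omega, by omega⟩
          · exact h2 ⟨hk, h⟩
        rw [if_neg h2, if_neg h1]
      · have hcont : ((j : Int) ∈ i :: rest) ↔ ((j : Int) ∈ rest) := by
          simp [hji]
        simp only [hcont]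

-- ===== VERDICT (by name: the statement is the Claim_ definition above) =====
theorem z_to_label_spec : Claim_equal_z_to_label := by
  intro z k _
  show z_to_label z k = z_to_label_alt z k
  apply String.ext
  unfold z_to_label z_to_label_alt
  rw [zA_chars, PySem.List.pyRange_one]
  simp only [String.toList_ofList, List.map_map]
  apply List.ext_getElem
  · rw [zB_len]; simp
  · intro j h1 h2
    have hlen : j < (List.replicate k.toNat '*').length := by
      rw [zB_len] at h2; exact h2
    rw [zB_get z k _ j hlen]
    have hjk : (j : Int) < k := by
      simp at h1; omega
    simp [hjk]
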